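-- pv_equiv track=rewrite | github.com/yhzhu99/HealthFlow | data/ehrflowbench/scripts/prepare_tasks/curate_generated_tasks.py | classify_required_input_set
-- ===== SOURCE A (Python) =====
-- DATASET_CORE_REQUIRED_INPUTS = {
--     "tjh": {
--         "data/ehrflowbench/processed/tjh/tjh_formatted_ehr.parquet",
--         "data/ehrflowbench/processed/tjh/split_metadata.json",
--     },
--     "mimic_iv_demo": {
--         "data/ehrflowbench/processed/mimic_iv_demo/mimic_iv_demo_formatted_ehr.parquet",
--         "data/ehrflowbench/processed/mimic_iv_demo/split_metadata.json",
--     },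
-- }
--
-- DATASET_OPTIONAL_REQUIRED_INPUTS = {
--     "tjh": set(),
--     "mimic_iv_demo": {
--         "data/ehrflowbench/processed/mimic_iv_demo/mimic_iv_demo_value_reference.md",
--     },
-- }
--
-- def classify_required_input_set(required_inputs: tuple[str, ...]) -> tuple[str | None, bool, bool, bool]:
--     input_set = set(required_inputs)
--     touched_datasets = {
--         dataset_key
--         for dataset_key in DATASET_CORE_REQUIRED_INPUTS
--         if input_set
--         & (
--             DATASET_CORE_REQUIRED_INPUTS[dataset_key]
--             | DATASET_OPTIONAL_REQUIRED_INPUTS.get(dataset_key, set())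
--         )
--     }
--     has_mixed_dataset_inputs = len(touched_datasets) > 1
--
--     matched_dataset: str | None = None
--     for dataset_key, core_inputs in DATASET_CORE_REQUIRED_INPUTS.items():
--         allowed_inputs = core_inputs | DATASET_OPTIONAL_REQUIRED_INPUTS.get(dataset_key, set())
--         if core_inputs.issubset(input_set) and input_set.issubset(allowed_inputs):
--             matched_dataset = dataset_key
--             break
--
--     has_valid_single_dataset_inputs = matched_dataset is not None
--     has_split_inputs = bool(
--         matched_dataset
--         and any(path.endswith("/split_metadata.json") for path in DATASET_CORE_REQUIRED_INPUTS[matched_dataset] & input_set)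
--     )
--     return matched_dataset, has_valid_single_dataset_inputs, has_split_inputs, has_mixed_dataset_inputs
-- ===== SOURCE B (Python) =====
-- DATASET_CORE_REQUIRED_INPUTS = {
--     "tjh": {
--         "data/ehrflowbench/processed/tjh/tjh_formatted_ehr.parquet",
--         "data/ehrflowbench/processed/tjh/split_metadata.json",
--     },
--     "mimic_iv_demo": {
--         "data/ehrflowbench/processed/mimic_iv_demo/mimic_iv_demo_formatted_ehr.parquet",
--         "data/ehrflowbench/processed/mimic_iv_demo/split_metadata.json",
--     },
-- }
--
-- DATASET_OPTIONAL_REQUIRED_INPUTS = {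
--     "tjh": set(),
--     "mimic_iv_demo": {
--         "data/ehrflowbench/processed/mimic_iv_demo/mimic_iv_demo_value_reference.md",
--     },
-- }
--
-- # Inverted index: each recognised path -> the dataset it belongs to.
-- _PATH_DATASET = {}
-- for _dataset, _core in DATASET_CORE_REQUIRED_INPUTS.items():
--     for _path in _core:
--         _PATH_DATASET[_path] = _dataset
-- for _dataset, _optional in DATASET_OPTIONAL_REQUIRED_INPUTS.items():
--     for _path in _optional:
--         _PATH_DATASET[_path] = _dataset
--
--
-- def classify_required_input_set(required_inputs: tuple[str, ...]) -> tuple[str | None, bool, bool, bool]: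
--     input_set = set(required_inputs)
--     has_unknown = any(path not in _PATH_DATASET for path in input_set)
--     datasets = {_PATH_DATASET[path] for path in input_set if path in _PATH_DATASET}
--     matched = None
--     if not has_unknown and len(datasets) == 1:
--         (candidate,) = datasets
--         if all(path in input_set for path in DATASET_CORE_REQUIRED_INPUTS[candidate]):
--             matched = candidate
--     has_split = matched is not None and any(
--         path.endswith("/split_metadata.json") for path in DATASET_CORE_REQUIRED_INPUTS[matched]
--     )
--     return matched, matched is not None, has_split, len(datasets) > 1
-- ===== Notes on version B (the rewrite author's own statement) =====
-- stated objective: alternative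
-- what changed: A tests each dataset's config against the input with set algebra (intersection non-emptiness, two subset tests, a break loop); B inverts the data: a path->dataset index built once classifies each input path, the match is the unique touched dataset (given no unknown paths) with full core coverage, and the split flag is read off the matched dataset's core config.
import Mathlib
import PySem

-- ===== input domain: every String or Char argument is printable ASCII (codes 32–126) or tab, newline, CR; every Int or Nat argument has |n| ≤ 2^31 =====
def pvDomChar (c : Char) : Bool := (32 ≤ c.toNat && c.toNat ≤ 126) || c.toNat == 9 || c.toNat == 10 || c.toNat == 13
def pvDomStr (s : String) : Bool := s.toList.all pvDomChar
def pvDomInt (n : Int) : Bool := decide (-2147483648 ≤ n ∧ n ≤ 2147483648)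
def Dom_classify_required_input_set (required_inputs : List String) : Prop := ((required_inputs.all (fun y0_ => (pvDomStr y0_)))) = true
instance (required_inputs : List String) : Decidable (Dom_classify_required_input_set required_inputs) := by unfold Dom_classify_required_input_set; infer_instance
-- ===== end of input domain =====

-- B replaces A's per-dataset set algebra (intersection/subset tests against each dataset's config,
-- with a break loop) by an inverted path→dataset index: each input path is classified once, the
-- match is the unique touched dataset with full core coverage; objective: alternative, same cost.

-- ===== PORT A =====
def pvCoreTjh : PySem.Set String := PySem.Set.ofList
  ["data/ehrflowbench/processed/tjh/tjh_formatted_ehr.parquet",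
   "data/ehrflowbench/processed/tjh/split_metadata.json"]
def pvCoreMimic : PySem.Set String := PySem.Set.ofList
  ["data/ehrflowbench/processed/mimic_iv_demo/mimic_iv_demo_formatted_ehr.parquet",
   "data/ehrflowbench/processed/mimic_iv_demo/split_metadata.json"]
def pvOptMimic : PySem.Set String := PySem.Set.ofList
  ["data/ehrflowbench/processed/mimic_iv_demo/mimic_iv_demo_value_reference.md"]

def DATASET_CORE_REQUIRED_INPUTS : PySem.Dict String (PySem.Set String) :=
  PySem.Dict.ofList [("tjh", pvCoreTjh), ("mimic_iv_demo", pvCoreMimic)]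
def DATASET_OPTIONAL_REQUIRED_INPUTS : PySem.Dict String (PySem.Set String) :=
  PySem.Dict.ofList [("tjh", PySem.Set.empty), ("mimic_iv_demo", pvOptMimic)]

-- the 'for dataset_key, core_inputs in DATASET_CORE_REQUIRED_INPUTS.items(): … break' loop
def pvFindMatch (input_set : PySem.Set String) : List (String × PySem.Set String) → Option String
  | [] => none
  | (dataset_key, core_inputs) :: rest =>
    let allowed_inputs := PySem.Set.union core_inputs
      (DATASET_OPTIONAL_REQUIRED_INPUTS.getD dataset_key PySem.Set.empty)
    if PySem.Set.issubset core_inputs input_set && PySem.Set.issubset input_set allowed_inputs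
    then some dataset_key
    else pvFindMatch input_set rest

-- A's body after 'input_set = set(required_inputs)'
def pvClassifyA (input_set : PySem.Set String) : Option String × Bool × Bool × Bool :=
  let touched_datasets : PySem.Set String := PySem.Set.ofList
    (DATASET_CORE_REQUIRED_INPUTS.keys.filter (fun dataset_key =>
      !((PySem.Set.inter input_set
          (PySem.Set.union (DATASET_CORE_REQUIRED_INPUTS.getD dataset_key PySem.Set.empty)
            (DATASET_OPTIONAL_REQUIRED_INPUTS.getD dataset_key PySem.Set.empty))).isEmpty)))
  let has_mixed_dataset_inputs := decide (PySem.Set.len touched_datasets > 1)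
  let matched_dataset := pvFindMatch input_set DATASET_CORE_REQUIRED_INPUTS.items
  let has_valid_single_dataset_inputs := matched_dataset.isSome
  let has_split_inputs :=
    match matched_dataset with
    | none => false
    | some k =>
      (PySem.Set.inter (DATASET_CORE_REQUIRED_INPUTS.getD k PySem.Set.empty) input_set).any
        (fun path => PySem.Str.endswith path "/split_metadata.json")
  (matched_dataset, has_valid_single_dataset_inputs, has_split_inputs, has_mixed_dataset_inputs)

def classify_required_input_set (required_inputs : List String) : Option String × Bool × Bool × Bool :=
  pvClassifyA (PySem.Set.ofList required_inputs)

-- ===== PORT B =====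
-- module-level construction of the inverted index _PATH_DATASET
def pvPathDataset : PySem.Dict String String :=
  let d := DATASET_CORE_REQUIRED_INPUTS.items.foldl
    (fun acc kv => kv.2.foldl (fun acc path => acc.insert path kv.1) acc) PySem.Dict.empty
  DATASET_OPTIONAL_REQUIRED_INPUTS.items.foldl
    (fun acc kv => kv.2.foldl (fun acc path => acc.insert path kv.1) acc) d

-- B's body after 'input_set = set(required_inputs)'
def pvClassifyB (input_set : PySem.Set String) : Option String × Bool × Bool × Bool :=
  let has_unknown := input_set.any (fun path => !(pvPathDataset.contains path))
  let datasets : PySem.Set String :=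
    PySem.Set.ofList (input_set.filterMap (fun path => pvPathDataset.get? path))
  let matched : Option String :=
    if !has_unknown && (PySem.Set.len datasets == 1) then
      match datasets with
      | [candidate] =>
        if ((DATASET_CORE_REQUIRED_INPUTS.getD candidate PySem.Set.empty).all
              (fun path => PySem.Set.contains input_set path))
        then some candidate else none
      | _ => none   -- unreachable: guarded by len datasets == 1
    else none
  let has_split := matched.isSome &&
    (match matched with
     | some d => (DATASET_CORE_REQUIRED_INPUTS.getD d PySem.Set.empty).any
         (fun path => PySem.Str.endswith path "/split_metadata.json")
     | none => false)
  (matched, matched.isSome, has_split, decide (PySem.Set.len datasets > 1))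

def classify_required_input_set_alt (required_inputs : List String) : Option String × Bool × Bool × Bool :=
  pvClassifyB (PySem.Set.ofList required_inputs)

-- ===== PRECONDITION & SPEC =====
def Spec_classify_required_input_set (required_inputs : List String) (out : Option String × Bool × Bool × Bool) : Prop := out = classify_required_input_set_alt required_inputs
instance (required_inputs : List String) (out : Option String × Bool × Bool × Bool) : Decidable (Spec_classify_required_input_set required_inputs out) := by unfold Spec_classify_required_input_set; infer_instance

-- ===== CLAIM (what is proved, stated in full; the proofs are below) =====
def Claim_equal_classify_required_input_set : Prop := ∀ (required_inputs : List String), Dom_classify_required_input_set required_inputs → Spec_classify_required_input_set required_inputs (classify_required_input_set required_inputs)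

-- ===== LEMMAS AND PROOFS =====

-- the five recognised paths
def pvK1 : String := "data/ehrflowbench/processed/tjh/tjh_formatted_ehr.parquet"
def pvK2 : String := "data/ehrflowbench/processed/tjh/split_metadata.json"
def pvK3 : String := "data/ehrflowbench/processed/mimic_iv_demo/mimic_iv_demo_formatted_ehr.parquet"
def pvK4 : String := "data/ehrflowbench/processed/mimic_iv_demo/split_metadata.json"
def pvK5 : String := "data/ehrflowbench/processed/mimic_iv_demo/mimic_iv_demo_value_reference.md"

-- A's output as a function of the six membership flags of the input set
def pvOutA (b1 b2 b3 b4 b5 u : Bool) : Option String × Bool × Bool × Bool :=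
  let cT := b1 || b2
  let cM := b3 || b4 || b5
  let matched := if b1 && b2 && !(b3 || b4 || b5 || u) then some "tjh"
    else if b3 && b4 && !(b1 || b2 || u) then some "mimic_iv_demo" else none
  let split := match matched with
    | some "tjh" => b2
    | some _ => b4
    | none => false
  (matched, matched.isSome, split, cT && cM)

-- B's output as a function of the six membership flags of the input set
def pvOutB (b1 b2 b3 b4 b5 u : Bool) : Option String × Bool × Bool × Bool :=
  let dT := b1 || b2
  let dM := b3 || b4 || b5
  let matched := if !u && (dT != dM) then
      (if dT then (if b1 && b2 then some "tjh" else none)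
       else (if b3 && b4 then some "mimic_iv_demo" else none))
    else none
  (matched, matched.isSome, matched.isSome, dT && dM)

theorem pvOutAB : ∀ b1 b2 b3 b4 b5 u : Bool, pvOutA b1 b2 b3 b4 b5 u = pvOutB b1 b2 b3 b4 b5 u := by
  decide

-- generic facts about the set primitives, phrased over the decidable membership atoms
theorem pv_inter_isEmpty (s t : List String) :
    (PySem.Set.inter s t).isEmpty = !(t.any (fun y => decide (y ∈ s))) := by
  rw [Bool.eq_iff_iff]
  simp [PySem.Set.inter, List.isEmpty_iff, List.filter_eq_nil_iff]
  exact ⟨fun h x hx hs => h x hs hx, fun h x hs hx => h x hx hs⟩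

theorem pv_issubset_lit2 (s : List String) (a b : String) :
    PySem.Set.issubset [a,b] s = (decide (a ∈ s) && decide (b ∈ s)) := by
  rw [Bool.eq_iff_iff]
  simp [PySem.Set.issubset_iff]

theorem pv_subset2 (s : List String) (a b c d e : String)
    (hca : c ≠ a) (hcb : c ≠ b) (hda : d ≠ a) (hdb : d ≠ b) (hea : e ≠ a) (heb : e ≠ b) :
    PySem.Set.issubset s [a,b] =
      !(decide (c ∈ s) || decide (d ∈ s) || decide (e ∈ s) ||
        decide (∃ x ∈ s, x ≠ a ∧ x ≠ b ∧ x ≠ c ∧ x ≠ d ∧ x ≠ e)) := by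
  rw [Bool.eq_iff_iff]
  simp only [PySem.Set.issubset_iff, Bool.not_eq_true', Bool.or_eq_false_iff,
    decide_eq_false_iff_not, List.mem_cons, List.not_mem_nil, or_false]
  constructor
  · intro h
    refine ⟨⟨⟨fun hc => ?_, fun hd' => ?_⟩, fun he' => ?_⟩, ?_⟩
    · rcases h c hc with h' | h' <;> simp_all
    · rcases h d hd' with h' | h' <;> simp_all
    · rcases h e he' with h' | h' <;> simp_all
    · rintro ⟨x, hx, h1, h2, _, _, _⟩
      rcases h x hx with h' | h' <;> simp_all
  · rintro ⟨⟨⟨hc, hd'⟩, he'⟩, hU⟩ x hx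
    by_contra hn
    rcases not_or.mp hn with ⟨h1, h2⟩
    by_cases hxc : x = c
    · exact hc (hxc ▸ hx)
    by_cases hxd : x = d
    · exact hd' (hxd ▸ hx)
    by_cases hxe : x = e
    · exact he' (hxe ▸ hx)
    · exact hU ⟨x, hx, h1, h2, hxc, hxd, hxe⟩

theorem pv_subset3 (s : List String) (a b c d e : String)
    (hac : a ≠ c) (had : a ≠ d) (hae : a ≠ e) (hbc : b ≠ c) (hbd : b ≠ d) (hbe : b ≠ e) :
    PySem.Set.issubset s [c,d,e] =
      !(decide (a ∈ s) || decide (b ∈ s) ||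
        decide (∃ x ∈ s, x ≠ a ∧ x ≠ b ∧ x ≠ c ∧ x ≠ d ∧ x ≠ e)) := by
  rw [Bool.eq_iff_iff]
  simp only [PySem.Set.issubset_iff, Bool.not_eq_true', Bool.or_eq_false_iff,
    decide_eq_false_iff_not, List.mem_cons, List.not_mem_nil, or_false]
  constructor
  · intro h
    refine ⟨⟨fun ha' => ?_, fun hb' => ?_⟩, ?_⟩
    · rcases h a ha' with h' | h' | h' <;> simp_all
    · rcases h b hb' with h' | h' | h' <;> simp_all
    · rintro ⟨x, hx, _, _, h3, h4, h5⟩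
      rcases h x hx with h' | h' | h' <;> simp_all
  · rintro ⟨⟨ha', hb'⟩, hU⟩ x hx
    by_contra hn
    rcases not_or.mp hn with ⟨h3, hn2⟩
    rcases not_or.mp hn2 with ⟨h4, h5⟩
    by_cases hxa : x = a
    · exact ha' (hxa ▸ hx)
    by_cases hxb : x = b
    · exact hb' (hxb ▸ hx)
    · exact hU ⟨x, hx, hxa, hxb, h3, h4, h5⟩

-- A's result, expressed through the six membership flags
theorem pvA_flags (s : PySem.Set String) :
    pvClassifyA s = pvOutA (decide (pvK1 ∈ s)) (decide (pvK2 ∈ s)) (decide (pvK3 ∈ s))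
      (decide (pvK4 ∈ s)) (decide (pvK5 ∈ s))
      (decide (∃ x ∈ s, x ≠ pvK1 ∧ x ≠ pvK2 ∧ x ≠ pvK3 ∧ x ≠ pvK4 ∧ x ≠ pvK5)) := by
  have hmatch : pvFindMatch s DATASET_CORE_REQUIRED_INPUTS.items =
      (if (decide (pvK1 ∈ s) && decide (pvK2 ∈ s)) &&
          !(decide (pvK3 ∈ s) || decide (pvK4 ∈ s) || decide (pvK5 ∈ s) ||
            decide (∃ x ∈ s, x ≠ pvK1 ∧ x ≠ pvK2 ∧ x ≠ pvK3 ∧ x ≠ pvK4 ∧ x ≠ pvK5))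
       then some "tjh"
       else if (decide (pvK3 ∈ s) && decide (pvK4 ∈ s)) &&
          !(decide (pvK1 ∈ s) || decide (pvK2 ∈ s) ||
            decide (∃ x ∈ s, x ≠ pvK1 ∧ x ≠ pvK2 ∧ x ≠ pvK3 ∧ x ≠ pvK4 ∧ x ≠ pvK5))
       then some "mimic_iv_demo" else none) := by
    rw [show DATASET_CORE_REQUIRED_INPUTS.items =
        [("tjh", [pvK1, pvK2]), ("mimic_iv_demo", [pvK3, pvK4])] from rfl]
    simp only [pvFindMatch]
    rw [show PySem.Set.union [pvK1, pvK2]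
        (DATASET_OPTIONAL_REQUIRED_INPUTS.getD "tjh" PySem.Set.empty) = [pvK1, pvK2] from rfl,
      show PySem.Set.union [pvK3, pvK4]
        (DATASET_OPTIONAL_REQUIRED_INPUTS.getD "mimic_iv_demo" PySem.Set.empty) = [pvK3, pvK4, pvK5] from rfl,
      pv_issubset_lit2, pv_issubset_lit2,
      pv_subset2 s pvK1 pvK2 pvK3 pvK4 pvK5 (by decide) (by decide) (by decide) (by decide) (by decide) (by decide),
      pv_subset3 s pvK1 pvK2 pvK3 pvK4 pvK5 (by decide) (by decide) (by decide) (by decide) (by decide) (by decide)]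
  simp only [pvClassifyA]
  rw [show DATASET_CORE_REQUIRED_INPUTS.keys = ["tjh", "mimic_iv_demo"] from rfl]
  simp only [List.filter_cons, List.filter_nil]
  rw [show (PySem.Set.union (DATASET_CORE_REQUIRED_INPUTS.getD "tjh" PySem.Set.empty)
      (DATASET_OPTIONAL_REQUIRED_INPUTS.getD "tjh" PySem.Set.empty)) = [pvK1, pvK2] from rfl,
    show (PySem.Set.union (DATASET_CORE_REQUIRED_INPUTS.getD "mimic_iv_demo" PySem.Set.empty)
      (DATASET_OPTIONAL_REQUIRED_INPUTS.getD "mimic_iv_demo" PySem.Set.empty)) = [pvK3, pvK4, pvK5] from rfl,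
    pv_inter_isEmpty s [pvK1, pvK2], pv_inter_isEmpty s [pvK3, pvK4, pvK5], hmatch]
  have hgT : DATASET_CORE_REQUIRED_INPUTS.getD "tjh" ([] : List String) = [pvK1, pvK2] := rfl
  have hgM : DATASET_CORE_REQUIRED_INPUTS.getD "mimic_iv_demo" ([] : List String) = [pvK3, pvK4] := rfl
  by_cases h1 : pvK1 ∈ s <;> by_cases h2 : pvK2 ∈ s <;> by_cases h3 : pvK3 ∈ s <;>
    by_cases h4 : pvK4 ∈ s <;> by_cases h5 : pvK5 ∈ s <;>
    by_cases h6 : (∃ x ∈ s, x ≠ pvK1 ∧ x ≠ pvK2 ∧ x ≠ pvK3 ∧ x ≠ pvK4 ∧ x ≠ pvK5) <;>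
    simp [h1, h2, h3, h4, h5, h6, pvOutA, hgT, hgM, PySem.Set.len, PySem.Set.ofList] <;>
    first
      | exact ⟨pvK2, ⟨by simp, h2⟩, by decide⟩
      | exact ⟨pvK4, ⟨by simp, h4⟩, by decide⟩

-- the inverted index as a literal dict
theorem pv_hidx : pvPathDataset = PySem.Dict.mk
    [(pvK1, "tjh"), (pvK2, "tjh"), (pvK3, "mimic_iv_demo"), (pvK4, "mimic_iv_demo"), (pvK5, "mimic_iv_demo")] := rfl

-- a Nodup list over a two-element universe has one of five shapes
theorem pv_shape (ds : List String) (a b : String) (hab : a ≠ b) (hnd : ds.Nodup)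
    (hsub : ∀ x ∈ ds, x = a ∨ x = b) :
    ds = [] ∨ ds = [a] ∨ ds = [b] ∨ ds = [a, b] ∨ ds = [b, a] := by
  match ds with
  | [] => exact Or.inl rfl
  | [x] =>
    rcases hsub x (by simp) with rfl | rfl
    · exact Or.inr (Or.inl rfl)
    · exact Or.inr (Or.inr (Or.inl rfl))
  | [x, y] =>
    have hxy : x ≠ y := by simp at hnd; exact hnd
    rcases hsub x (by simp) with rfl | rfl <;> rcases hsub y (by simp) with rfl | rfl
    · exact absurd rfl hxy
    · exact Or.inr (Or.inr (Or.inr (Or.inl rfl)))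
    · exact Or.inr (Or.inr (Or.inr (Or.inr rfl)))
    · exact absurd rfl hxy
  | x :: y :: z :: t =>
    exfalso
    simp [List.nodup_cons] at hnd
    rcases hsub x (by simp) with rfl | rfl <;> rcases hsub y (by simp) with h | h <;>
      rcases hsub z (by simp) with h' | h' <;> simp_all

theorem pv_get_idx (p : String) : pvPathDataset.get? p =
    if pvK1 = p then some "tjh" else if pvK2 = p then some "tjh"
    else if pvK3 = p then some "mimic_iv_demo" else if pvK4 = p then some "mimic_iv_demo"
    else if pvK5 = p then some "mimic_iv_demo" else none := by
  rw [pv_hidx]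
  simp only [PySem.Dict.get?_mk_cons, beq_iff_eq]
  rfl

theorem pv_memT (s : List String) :
    ("tjh" ∈ List.filterMap (fun p => pvPathDataset.get? p) s) ↔ (pvK1 ∈ s ∨ pvK2 ∈ s) := by
  simp only [List.mem_filterMap, pv_get_idx]
  constructor
  · rintro ⟨a, ha, hg⟩
    split_ifs at hg with g1 g2 g3 g4 g5 <;> simp_all
  · rintro (h | h)
    · exact ⟨pvK1, h, by simp⟩
    · exact ⟨pvK2, h, by simp⟩

theorem pv_memM (s : List String) :
    ("mimic_iv_demo" ∈ List.filterMap (fun p => pvPathDataset.get? p) s) ↔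
      (pvK3 ∈ s ∨ pvK4 ∈ s ∨ pvK5 ∈ s) := by
  simp only [List.mem_filterMap, pv_get_idx]
  constructor
  · rintro ⟨a, ha, hg⟩
    split_ifs at hg with g1 g2 g3 g4 g5 <;> simp_all
  · rintro (h | h | h)
    · refine ⟨pvK3, h, ?_⟩
      rw [if_neg (by decide), if_neg (by decide), if_pos rfl]
    · refine ⟨pvK4, h, ?_⟩
      rw [if_neg (by decide), if_neg (by decide), if_neg (by decide), if_pos rfl]
    · refine ⟨pvK5, h, ?_⟩
      rw [if_neg (by decide), if_neg (by decide), if_neg (by decide), if_neg (by decide), if_pos rfl]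

theorem pv_memSub (s : List String) :
    ∀ x ∈ List.filterMap (fun p => pvPathDataset.get? p) s, x = "tjh" ∨ x = "mimic_iv_demo" := by
  intro x hx
  simp only [List.mem_filterMap, pv_get_idx] at hx
  rcases hx with ⟨a, ha, hg⟩
  split_ifs at hg <;> simp_all

theorem pv_unknown (s : List String) :
    (s.any (fun path => !(pvPathDataset.contains path))) =
      decide (∃ x ∈ s, x ≠ pvK1 ∧ x ≠ pvK2 ∧ x ≠ pvK3 ∧ x ≠ pvK4 ∧ x ≠ pvK5) := by
  rw [Bool.eq_iff_iff]
  rw [pv_hidx]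
  simp [List.any_eq_true, PySem.Dict.contains]
  constructor <;>
    · rintro ⟨x, hx, h⟩
      exact ⟨x, hx, by tauto⟩

theorem pv_ct (s : List String) (x : String) : PySem.Set.contains s x = decide (x ∈ s) := by
  rw [Bool.eq_iff_iff]; simp

-- B's result, expressed through the six membership flags
theorem pvB_flags (s : PySem.Set String) :
    pvClassifyB s = pvOutB (decide (pvK1 ∈ s)) (decide (pvK2 ∈ s)) (decide (pvK3 ∈ s))
      (decide (pvK4 ∈ s)) (decide (pvK5 ∈ s))
      (decide (∃ x ∈ s, x ≠ pvK1 ∧ x ≠ pvK2 ∧ x ≠ pvK3 ∧ x ≠ pvK4 ∧ x ≠ pvK5)) := by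
  have hgT : DATASET_CORE_REQUIRED_INPUTS.getD "tjh" PySem.Set.empty = [pvK1, pvK2] := rfl
  have hgM : DATASET_CORE_REQUIRED_INPUTS.getD "mimic_iv_demo" PySem.Set.empty = [pvK3, pvK4] := rfl
  have hnd : (PySem.Set.ofList (s.filterMap (fun path => pvPathDataset.get? path))).Nodup :=
    PySem.Set.nodup_ofList _
  have hT : ("tjh" ∈ PySem.Set.ofList (s.filterMap (fun path => pvPathDataset.get? path))) ↔
      (pvK1 ∈ s ∨ pvK2 ∈ s) := by rw [PySem.Set.mem_ofList]; exact pv_memT s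
  have hM : ("mimic_iv_demo" ∈ PySem.Set.ofList (s.filterMap (fun path => pvPathDataset.get? path))) ↔
      (pvK3 ∈ s ∨ pvK4 ∈ s ∨ pvK5 ∈ s) := by rw [PySem.Set.mem_ofList]; exact pv_memM s
  have hsub : ∀ x ∈ PySem.Set.ofList (s.filterMap (fun path => pvPathDataset.get? path)),
      x = "tjh" ∨ x = "mimic_iv_demo" := by
    intro x hx
    exact pv_memSub s x ((PySem.Set.mem_ofList _ _).mp hx)
  simp only [pvClassifyB, pv_unknown s]
  generalize hD : PySem.Set.ofList (s.filterMap (fun path => pvPathDataset.get? path)) = D at *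
  rcases pv_shape D "tjh" "mimic_iv_demo" (by decide) hnd hsub with h | h | h | h | h <;> subst h
  · -- D = []
    simp only [List.mem_nil_iff, false_iff, not_or] at hT hM
    simp [pvOutB, hT.1, hT.2, hM.1, hM.2.1, hM.2.2]
  · -- D = ["tjh"]
    simp at hT hM
    have hdT : (decide (pvK1 ∈ s) || decide (pvK2 ∈ s)) = true := by
      rcases hT with h | h <;> simp [h]
    have h3' : decide (pvK3 ∈ s) = false := by simpa using hM.1
    have h4' : decide (pvK4 ∈ s) = false := by simpa using hM.2.1
    have h5' : decide (pvK5 ∈ s) = false := by simpa using hM.2.2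
    simp only [hgT, List.all_cons, List.all_nil, pv_ct, h3', h4', h5']
    revert hdT
    generalize decide (pvK1 ∈ s) = b1
    generalize decide (pvK2 ∈ s) = b2
    generalize decide (∃ x ∈ s, x ≠ pvK1 ∧ x ≠ pvK2 ∧ x ≠ pvK3 ∧ x ≠ pvK4 ∧ x ≠ pvK5) = u
    revert b1 b2 u
    decide
  · -- D = ["mimic_iv_demo"]
    simp at hT hM
    have hdM : (decide (pvK3 ∈ s) || decide (pvK4 ∈ s) || decide (pvK5 ∈ s)) = true := by
      rcases hM with h | h | h <;> simp [h]
    have h1' : decide (pvK1 ∈ s) = false := by simpa using hT.1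
    have h2' : decide (pvK2 ∈ s) = false := by simpa using hT.2
    simp only [hgM, List.all_cons, List.all_nil, pv_ct, h1', h2']
    revert hdM
    generalize decide (pvK3 ∈ s) = b3
    generalize decide (pvK4 ∈ s) = b4
    generalize decide (pvK5 ∈ s) = b5
    generalize decide (∃ x ∈ s, x ≠ pvK1 ∧ x ≠ pvK2 ∧ x ≠ pvK3 ∧ x ≠ pvK4 ∧ x ≠ pvK5) = u
    revert b3 b4 b5 u
    decide
  · -- D = ["tjh", "mimic_iv_demo"]
    have hdT : (decide (pvK1 ∈ s) || decide (pvK2 ∈ s)) = true := by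
      rcases hT.mp (by simp) with h | h <;> simp [h]
    have hdM : (decide (pvK3 ∈ s) || decide (pvK4 ∈ s) || decide (pvK5 ∈ s)) = true := by
      rcases hM.mp (by simp) with h | h | h <;> simp [h]
    simp [pvOutB, hdT, hdM]
  · -- D = ["mimic_iv_demo", "tjh"]
    have hdT : (decide (pvK1 ∈ s) || decide (pvK2 ∈ s)) = true := by
      rcases hT.mp (by simp) with h | h <;> simp [h]
    have hdM : (decide (pvK3 ∈ s) || decide (pvK4 ∈ s) || decide (pvK5 ∈ s)) = true := by
      rcases hM.mp (by simp) with h | h | h <;> simp [h]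
    simp [pvOutB, hdT, hdM]

-- ===== VERDICT (by name: the statement is the Claim_ definition above) =====
theorem classify_required_input_set_spec : Claim_equal_classify_required_input_set := by
  intro required_inputs _
  unfold Spec_classify_required_input_set classify_required_input_set classify_required_input_set_alt
  rw [pvA_flags, pvB_flags, pvOutAB]
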